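-- pv_equiv track=rewrite | github.com/malinoff/amqproto | setup.py | lookup_extras
-- ===== SOURCE A (Python) =====
-- def lookup_extras(requirement, extras):
--     if not requirement.startswith('['):
--         return [requirement]
--     extra = requirement.strip('[]')
--     requirements = []
--     for requirement in extras[extra]:
--         requirements += lookup_extras(requirement, extras)
--     return requirements
-- ===== SOURCE B (Python) =====
-- def lookup_extras(requirement, extras):
--     # Iterative DFS with an explicit stack instead of recursion.
--     stack = [requirement]
--     requirements = []
--     while stack:
--         item = stack.pop()
--         if item.startswith('['):
--             # push children reversed so they are processed left-to-right
--             stack.extend(reversed(extras[item.strip('[]')]))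
--         else:
--             requirements.append(item)
--     return requirements
-- ===== Notes on version B (the rewrite author's own statement) =====
-- stated objective: alternative
-- what changed: Replaces the recursion (recursive calls accumulated with list +=) by an iterative depth-first traversal over an explicit stack, pushing looked-up children in reversed order so the preorder leaf order is preserved.
import Mathlib
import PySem

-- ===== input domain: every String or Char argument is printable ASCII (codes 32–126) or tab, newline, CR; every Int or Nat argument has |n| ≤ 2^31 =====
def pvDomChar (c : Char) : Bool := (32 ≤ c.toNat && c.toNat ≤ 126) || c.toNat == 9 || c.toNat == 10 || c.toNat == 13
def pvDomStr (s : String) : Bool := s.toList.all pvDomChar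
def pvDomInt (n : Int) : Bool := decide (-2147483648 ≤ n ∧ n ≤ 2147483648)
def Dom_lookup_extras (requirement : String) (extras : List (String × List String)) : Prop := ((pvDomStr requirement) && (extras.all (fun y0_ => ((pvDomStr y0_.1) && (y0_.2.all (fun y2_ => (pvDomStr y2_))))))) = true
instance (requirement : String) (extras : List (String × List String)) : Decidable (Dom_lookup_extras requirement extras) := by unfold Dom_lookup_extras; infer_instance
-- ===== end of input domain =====

-- B replaces the recursive expansion by an iterative DFS over an explicit stack (same output; no speed claim).


-- ===== PORT A =====
-- A's unbounded recursion is guarded by fuel. Under Pre_ (well-founded expansion) the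
-- nesting depth is at most extras.length + 1 — a bracketed path that revisits a key never
-- terminates, and distinct keys number at most extras.length — so the fuel is never
-- exhausted; where Python raises (KeyError / infinite recursion) Pre_ excludes the input
-- and the fuel value and the dict-lookup default are never relied on.
def lookupExtrasRecA (fuel : Nat) (requirement : String) (extras : List (String × List String)) : List String :=
  match fuel with
  | 0 => []
  | fuel + 1 =>
    if !(PySem.Str.startswith requirement "[") then [requirement]
    else
      let extra := PySem.Str.stripChars requirement "[]"
      ((PySem.Dict.mk extras).getD extra []).foldl
        (fun requirements r => requirements ++ lookupExtrasRecA fuel r extras) []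

def lookup_extras (requirement : String) (extras : List (String × List String)) : List String :=
  lookupExtrasRecA (extras.length + 2) requirement extras

-- ===== PORT B =====
-- Explicit-stack DFS; Lean list head = Python stack top (end of the Python list), so
-- Python's stack.extend(reversed(children)) is children ++ stack here. The while-loop is
-- guarded by fuel (S+1)^(n+1), S = total number of listed children, n = extras.length:
-- under Pre_ this bounds the number of iterations, so the loop always ends on an empty stack.
def lookupExtrasLoopB (fuel : Nat) (stack : List String) (requirements : List String)
    (extras : List (String × List String)) : List String :=
  match fuel, stack with
  | 0, _ => requirements
  | _ + 1, [] => requirements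
  | fuel + 1, item :: stack =>
    if PySem.Str.startswith item "[" then
      lookupExtrasLoopB fuel
        (((PySem.Dict.mk extras).getD (PySem.Str.stripChars item "[]") []) ++ stack)
        requirements extras
    else
      lookupExtrasLoopB fuel stack (requirements ++ [item]) extras

def lookup_extras_alt (requirement : String) (extras : List (String × List String)) : List String :=
  lookupExtrasLoopB (((extras.map (fun p => p.2.length)).sum + 1) ^ (extras.length + 1))
    [requirement] [] extras

-- ===== PRECONDITION & SPEC =====
-- pvExpandOk f r extras: the bracket-expansion of r is well-founded — nested at most f
-- levels deep, with every looked-up key present in extras.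
def pvExpandOk (extras : List (String × List String)) : Nat → String → Bool
  | 0, r => !(PySem.Str.startswith r "[")
  | f + 1, r =>
    if PySem.Str.startswith r "[" then
      match (PySem.Dict.mk extras).get? (PySem.Str.stripChars r "[]") with
      | none => false
      | some vs => vs.all (fun v => pvExpandOk extras f v)
    else true

-- Pre_ excludes exactly the inputs on which A raises: a missing key somewhere in the
-- expansion (KeyError) or a cyclic expansion (infinite recursion). A terminating expansion
-- never repeats a key on a path, so its depth is at most extras.length + 1 and Pre_ admits it.
def Pre_lookup_extras (requirement : String) (extras : List (String × List String)) : Prop :=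
  pvExpandOk extras (extras.length + 1) requirement = true
instance (requirement : String) (extras : List (String × List String)) : Decidable (Pre_lookup_extras requirement extras) := by unfold Pre_lookup_extras; infer_instance

def pvWitness_lookup_extras : String × (List (String × List String)) :=
  ("[dev]", [("dev", ["pytest", "[doc]"]), ("doc", ["sphinx"])])

def Spec_lookup_extras (requirement : String) (extras : List (String × List String)) (out : List String) : Prop := out = lookup_extras_alt requirement extras
instance (requirement : String) (extras : List (String × List String)) (out : List String) : Decidable (Spec_lookup_extras requirement extras out) := by unfold Spec_lookup_extras; infer_instance

-- ===== CLAIM (what is proved, stated in full; the proofs are below) =====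
def Claim_equal_lookup_extras : Prop := ∀ (requirement : String) (extras : List (String × List String)), Dom_lookup_extras requirement extras → Pre_lookup_extras requirement extras → Spec_lookup_extras requirement extras (lookup_extras requirement extras)

-- ===== LEMMAS AND PROOFS =====

-- Number of loop iterations B needs to consume one stack entry, under depth bound f.
def pvCost (extras : List (String × List String)) : Nat → String → Nat
  | 0, _ => 1
  | f + 1, r =>
    if PySem.Str.startswith r "[" then
      1 + (((PySem.Dict.mk extras).getD (PySem.Str.stripChars r "[]") []).map
            (pvCost extras f)).sum
    else 1

-- Unfolding equations for the two ports and for pvCost, keyed on the branch condition.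
theorem recA_flat (extras : List (String × List String)) (fuel : Nat) (r : String)
    (hb : PySem.Str.startswith r "[" = false) :
    lookupExtrasRecA (fuel + 1) r extras = [r] := by
  simp only [lookupExtrasRecA]
  rw [if_pos (by simp only [hb]; decide)]

theorem recA_brack (extras : List (String × List String)) (fuel : Nat) (r : String)
    (hb : PySem.Str.startswith r "[" = true) :
    lookupExtrasRecA (fuel + 1) r extras
      = ((PySem.Dict.mk extras).getD (PySem.Str.stripChars r "[]") []).foldl
          (fun a v => a ++ lookupExtrasRecA fuel v extras) [] := by
  simp only [lookupExtrasRecA]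
  rw [if_neg (by simp only [hb]; decide)]

theorem loopB_cons_flat (extras : List (String × List String)) (fuel : Nat) (r : String)
    (stack res : List String) (hb : PySem.Str.startswith r "[" = false) :
    lookupExtrasLoopB (fuel + 1) (r :: stack) res extras
      = lookupExtrasLoopB fuel stack (res ++ [r]) extras := by
  simp only [lookupExtrasLoopB]
  rw [if_neg (by simp only [hb]; decide)]

theorem loopB_cons_brack (extras : List (String × List String)) (fuel : Nat) (r : String)
    (stack res : List String) (hb : PySem.Str.startswith r "[" = true) :
    lookupExtrasLoopB (fuel + 1) (r :: stack) res extras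
      = lookupExtrasLoopB fuel
          (((PySem.Dict.mk extras).getD (PySem.Str.stripChars r "[]") []) ++ stack) res extras := by
  simp only [lookupExtrasLoopB]
  rw [if_pos hb]

theorem pvCost_flat (extras : List (String × List String)) (f : Nat) (r : String)
    (hb : PySem.Str.startswith r "[" = false) : pvCost extras f r = 1 := by
  cases f with
  | zero => rfl
  | succ f => simp only [pvCost]; rw [if_neg (by simp only [hb]; decide)]

theorem pvCost_brack (extras : List (String × List String)) (f : Nat) (r : String)
    (hb : PySem.Str.startswith r "[" = true) :
    pvCost extras (f + 1) r
      = 1 + (((PySem.Dict.mk extras).getD (PySem.Str.stripChars r "[]") []).map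
              (pvCost extras f)).sum := by
  simp only [pvCost]; rw [if_pos hb]

-- The central absorption lemma: with exactly pvCost f r extra fuel, B's loop turns the
-- stack entry r into A's expansion of r (at depth f+1) appended to the results.
theorem loop_absorb (extras : List (String × List String)) (f : Nat) :
    ∀ r, pvExpandOk extras f r = true →
    ∀ (stack res : List String) (fuel : Nat),
      lookupExtrasLoopB (pvCost extras f r + fuel) (r :: stack) res extras
        = lookupExtrasLoopB fuel stack (res ++ lookupExtrasRecA (f + 1) r extras) extras := by
  induction f with
  | zero =>
    intro r hok stack res fuel
    have hb : PySem.Str.startswith r "[" = false := by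
      simpa only [pvExpandOk, Bool.not_eq_true'] using hok
    rw [pvCost_flat extras 0 r hb, Nat.add_comm 1 fuel,
      loopB_cons_flat extras fuel r stack res hb, recA_flat extras 0 r hb]
  | succ f ih =>
    intro r hok stack res fuel
    by_cases hb : PySem.Str.startswith r "[" = true
    · simp only [pvExpandOk] at hok
      rw [if_pos hb] at hok
      cases hget : (PySem.Dict.mk extras).get? (PySem.Str.stripChars r "[]") with
      | none => rw [hget] at hok; exact absurd hok (by simp)
      | some vs =>
        rw [hget] at hok
        simp only [List.all_eq_true] at hok
        have hgetD : (PySem.Dict.mk extras).getD (PySem.Str.stripChars r "[]") [] = vs :=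
          PySem.Dict.getD_of_get?_eq_some _ _ hget
        rw [pvCost_brack extras f r hb, hgetD, recA_brack extras (f + 1) r hb, hgetD,
          (by omega : 1 + (vs.map (pvCost extras f)).sum + fuel
            = ((vs.map (pvCost extras f)).sum + fuel) + 1),
          loopB_cons_brack extras _ r stack res hb, hgetD]
        -- consume the pushed children one by one
        have hlist : ∀ (ws : List String), (∀ v ∈ ws, pvExpandOk extras f v = true) →
            ∀ (res' : List String) (fuel' : Nat),
            lookupExtrasLoopB ((ws.map (pvCost extras f)).sum + fuel') (ws ++ stack) res' extras
              = lookupExtrasLoopB fuel' stack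
                  (ws.foldl (fun a v => a ++ lookupExtrasRecA (f + 1) v extras) res') extras := by
          intro ws
          induction ws with
          | nil => intro _ res' fuel'; simp
          | cons w ws ihw =>
            intro hws res' fuel'
            have hw := hws w (List.mem_cons_self ..)
            simp only [List.map_cons, List.sum_cons, List.cons_append, List.foldl_cons]
            rw [Nat.add_assoc, ih w hw (ws ++ stack) res' ((ws.map (pvCost extras f)).sum + fuel')]
            exact ihw (fun v hv => hws v (List.mem_cons_of_mem _ hv)) _ _
        rw [hlist vs (fun v hv => hok v hv) res fuel]
        rw [PySem.List.foldl_append_eq_flatMap, PySem.List.foldl_append_eq_flatMap,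
          List.nil_append]
    · have hb' : PySem.Str.startswith r "[" = false := by simpa using hb
      rw [pvCost_flat extras (f + 1) r hb', Nat.add_comm 1 fuel,
        loopB_cons_flat extras fuel r stack res hb', recA_flat extras (f + 1) r hb']

-- The loop with an empty stack returns the accumulated results, whatever the fuel.
theorem loop_nil (extras : List (String × List String)) (fuel : Nat) (res : List String) :
    lookupExtrasLoopB fuel [] res extras = res := by
  cases fuel <;> rfl

-- Any value list stored in extras has length at most the total children count S.
theorem getD_length_le (extras : List (String × List String)) (k : String) :
    ((PySem.Dict.mk extras).getD k []).length ≤ (extras.map (fun p => p.2.length)).sum := by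
  cases hget : (PySem.Dict.mk extras).get? k with
  | none => rw [PySem.Dict.getD_of_get?_eq_none _ _ hget]; simp
  | some vs =>
    rw [PySem.Dict.getD_of_get?_eq_some _ _ hget]
    have hmem : (k, vs) ∈ (PySem.Dict.mk extras).items :=
      PySem.Dict.mem_items_of_get?_eq_some _ hget
    exact List.single_le_sum (by simp) _ (List.mem_map.2 ⟨(k, vs), hmem, rfl⟩)

-- The cost of one entry is at most (S+1)^f — B's fixed fuel covers it.
theorem pvCost_le (extras : List (String × List String)) :
    ∀ (f : Nat) (r : String),
      pvCost extras f r ≤ ((extras.map (fun p => p.2.length)).sum + 1) ^ f := by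
  intro f
  induction f with
  | zero => intro r; simp [pvCost]
  | succ f ih =>
    intro r
    set S := (extras.map (fun p => p.2.length)).sum with hS
    by_cases hb : PySem.Str.startswith r "[" = true
    · set vs := (PySem.Dict.mk extras).getD (PySem.Str.stripChars r "[]") [] with hvs
      have hsum : (vs.map (pvCost extras f)).sum ≤ vs.length * (S + 1) ^ f := by
        calc (vs.map (pvCost extras f)).sum
            ≤ (vs.map (fun _ => (S + 1) ^ f)).sum := by
              apply List.sum_le_sum
              intro x _
              exact ih x
          _ = vs.length * (S + 1) ^ f := by
              simp [List.map_const', List.sum_replicate, smul_eq_mul]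
      have hlen : vs.length ≤ S := getD_length_le extras _
      have hpow : 1 ≤ (S + 1) ^ f := Nat.one_le_pow _ _ (by omega)
      rw [pvCost_brack extras f r hb, ← hvs, pow_succ]
      have h1 : (vs.map (pvCost extras f)).sum ≤ S * (S + 1) ^ f :=
        le_trans hsum (Nat.mul_le_mul_right _ hlen)
      calc 1 + (vs.map (pvCost extras f)).sum ≤ (S + 1) ^ f + S * (S + 1) ^ f := by omega
        _ = (S + 1) ^ f * (S + 1) := by ring
    · have hb' : PySem.Str.startswith r "[" = false := by simpa using hb
      rw [pvCost_flat extras (f + 1) r hb']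
      exact Nat.one_le_pow _ _ (by omega)

-- ===== VERDICT (by name: the statement is the Claim_ definition above) =====
theorem lookup_extras_spec : Claim_equal_lookup_extras := by
  intro requirement extras _ hpre
  unfold Spec_lookup_extras lookup_extras lookup_extras_alt
  set S := (extras.map (fun p => p.2.length)).sum with hS
  set n := extras.length with hn
  have hok : pvExpandOk extras (n + 1) requirement = true := hpre
  have hle : pvCost extras (n + 1) requirement ≤ (S + 1) ^ (n + 1) := pvCost_le extras _ _
  have hsplit : (S + 1) ^ (n + 1)
      = pvCost extras (n + 1) requirement + ((S + 1) ^ (n + 1) - pvCost extras (n + 1) requirement) :=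
    (Nat.add_sub_cancel' hle).symm
  rw [hsplit, loop_absorb extras (n + 1) requirement hok [] [] _, loop_nil, List.nil_append]
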